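-- pv_equiv track=rewrite | github.com/zhou-jk/kv-cache-hackthon | policies/palfu.py | _contiguous_prefix_len
-- ===== SOURCE A (Python) =====
-- from typing import Dict, Iterable, List, Tuple, Set, Optional
--
-- def _contiguous_prefix_len(blocks: Iterable[int]) -> int:
--     s = set(blocks)
--     if 1 not in s:
--         return 0
--     k = 1
--     while (k + 1) in s:
--         k += 1
--     return k
-- ===== SOURCE B (Python) =====
-- def _contiguous_prefix_len(blocks):
--     expected = 1
--     for v in sorted(set(blocks)):
--         if v == expected:
--             expected += 1
--         elif v > expected:
--             break
--         # else v < expected: duplicate-free values below the chain (<=0), skip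
--     return expected - 1
-- ===== Notes on version B (the rewrite author's own statement) =====
-- stated objective: alternative
-- what changed: Replaces the upward set-membership probing loop (while k+1 in s) with a single pass over sorted(set(blocks)) that tracks the next expected value, skipping values below it and breaking on the first gap.
import Mathlib
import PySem

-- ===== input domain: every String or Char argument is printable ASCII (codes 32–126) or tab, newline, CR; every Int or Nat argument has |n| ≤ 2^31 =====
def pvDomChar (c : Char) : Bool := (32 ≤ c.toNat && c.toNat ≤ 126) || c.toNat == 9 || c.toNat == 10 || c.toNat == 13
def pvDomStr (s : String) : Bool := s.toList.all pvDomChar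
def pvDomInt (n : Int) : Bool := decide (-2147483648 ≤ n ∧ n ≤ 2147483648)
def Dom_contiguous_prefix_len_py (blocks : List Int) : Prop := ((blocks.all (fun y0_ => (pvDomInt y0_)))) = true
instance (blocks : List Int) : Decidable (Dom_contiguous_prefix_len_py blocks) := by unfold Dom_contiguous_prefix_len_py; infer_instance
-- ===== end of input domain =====

-- B replaces A's upward set-membership probing with one pass over sorted(set(blocks)); alternative decomposition, same return value.

-- ===== PORT A =====
-- the 'while (k+1) in s: k += 1' loop; terminates because each step consumes a fresh element of s above k
def pvALoop (s : List Int) (k : Int) : Int :=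
  if (k + 1) ∈ s then pvALoop s (k + 1) else k
termination_by (s.filter (fun x => decide (k < x))).length
decreasing_by
  rename_i h
  have hsub : s.filter (fun x => decide (k + 1 < x))
      = (s.filter (fun x => decide (k < x))).filter (fun x => decide (k + 1 < x)) := by
    rw [List.filter_filter]
    apply List.filter_congr
    intro x _
    by_cases hx : k + 1 < x
    · have hk : k < x := by omega
      simp [hx, hk]
    · simp [hx]
  rw [hsub]
  apply List.length_filter_lt_length_iff_exists.mpr
  refine ⟨k + 1, ?_, by simp⟩
  simp only [List.mem_filter]
  exact ⟨h, by simp⟩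

def contiguous_prefix_len_py (blocks : List Int) : Int :=
  let s := PySem.Set.ofList blocks
  if (1 : Int) ∈ s then pvALoop s 1 else 0

-- ===== PORT B =====
-- the 'for v in sorted(set(blocks))' scan with the running expected value
def pvBScan (l : List Int) (e : Int) : Int :=
  match l with
  | [] => e
  | v :: t => if v = e then pvBScan t (e + 1) else if e < v then e else pvBScan t e

def contiguous_prefix_len_py_alt (blocks : List Int) : Int :=
  pvBScan (PySem.List.sorted (PySem.Set.ofList blocks) (fun x => x) false) 1 - 1

-- ===== PRECONDITION & SPEC =====
def Spec_contiguous_prefix_len_py (blocks : List Int) (out : Int) : Prop := out = contiguous_prefix_len_py_alt blocks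
instance (blocks : List Int) (out : Int) : Decidable (Spec_contiguous_prefix_len_py blocks out) := by unfold Spec_contiguous_prefix_len_py; infer_instance

-- ===== CLAIM (what is proved, stated in full; the proofs are below) =====
def Claim_equal_contiguous_prefix_len_py : Prop := ∀ (blocks : List Int), Dom_contiguous_prefix_len_py blocks → Spec_contiguous_prefix_len_py blocks (contiguous_prefix_len_py blocks)

-- ===== LEMMAS AND PROOFS =====

-- scanning a strictly sorted listing of s from expected = e computes A's probing loop started at e - 1, plus one
theorem pvBScan_eq_pvALoop (l s : List Int) (e : Int)
    (hsort : l.Pairwise (· < ·))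
    (hmem : ∀ x : Int, e ≤ x → (x ∈ l ↔ x ∈ s)) :
    pvBScan l e = pvALoop s (e - 1) + 1 := by
  induction l generalizing e with
  | nil =>
    rw [pvALoop]
    have hns : e ∉ s := fun hx => by simpa using (hmem e le_rfl).mpr hx
    have he : e - 1 + 1 = e := by ring
    simp [pvBScan, he, hns]
  | cons v t ih =>
    have hlt : ∀ x ∈ t, v < x := (List.pairwise_cons.mp hsort).1
    have htsort := (List.pairwise_cons.mp hsort).2
    rw [pvBScan]
    by_cases hv : v = e
    · subst hv
      have hvs : v ∈ s := (hmem v le_rfl).mp (List.mem_cons_self)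
      have step : pvALoop s (v - 1) = pvALoop s v := by
        rw [pvALoop]; simp [show v - 1 + 1 = v by ring, hvs]
      rw [if_pos rfl, step,
        show pvALoop s v = pvALoop s (v + 1 - 1) by norm_num]
      apply ih (v + 1) htsort
      intro x hx
      constructor
      · intro hxt; exact (hmem x (by omega)).mp (List.mem_cons_of_mem _ hxt)
      · intro hxs
        rcases List.mem_cons.mp ((hmem x (by omega)).mpr hxs) with h | h
        · omega
        · exact h
    · rw [if_neg hv]
      by_cases hgt : e < v
      · rw [if_pos hgt, pvALoop]
        have hns : e ∉ s := by
          intro hxs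
          rcases List.mem_cons.mp ((hmem e le_rfl).mpr hxs) with h | h
          · omega
          · exact absurd (hlt e h) (by omega)
        have he : e - 1 + 1 = e := by ring
        simp [he, hns]
      · rw [if_neg hgt]
        apply ih e htsort
        intro x hx
        have hvx : v < x := by omega
        constructor
        · intro hxt; exact (hmem x hx).mp (List.mem_cons_of_mem _ hxt)
        · intro hxs
          rcases List.mem_cons.mp ((hmem x hx).mpr hxs) with h | h
          · omega
          · exact h

-- ===== VERDICT (by name: the statement is the Claim_ definition above) =====
theorem contiguous_prefix_len_py_spec : Claim_equal_contiguous_prefix_len_py := by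
  intro blocks _
  unfold Spec_contiguous_prefix_len_py contiguous_prefix_len_py contiguous_prefix_len_py_alt
  set s := PySem.Set.ofList blocks with hs
  have key := pvBScan_eq_pvALoop (PySem.List.sorted s (fun x => x) false) s 1
    (PySem.List.sorted_ofList_pairwise_lt blocks)
    (fun x _ => PySem.List.mem_sorted s (fun x => x) false x)
  rw [key]
  rw [show pvALoop s (1 - 1) = pvALoop s 0 by norm_num, pvALoop]
  by_cases h1 : (1 : Int) ∈ s
  · simp [h1]
  · simp [h1]
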